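-- pv_equiv track=rewrite | github.com/Chakri3434/My_Codes | Basic programs/Hash Maps/intersection-of-2-arrays.py | f
-- ===== SOURCE A (Python) =====
-- def f(l1,l2):
--     s=set(l1)
--     c=0
--     for i in range(len(l2)):
--         if l2[i] in s:
--             c+=1
--             s.remove(l2[i])
--     return c
-- ===== SOURCE B (Python) =====
-- def f(l1, l2):
--     m = sorted(list(set(l1)) + list(set(l2)))
--     return sum(1 for x, y in zip(m, m[1:]) if x == y)
-- ===== Notes on version B (the rewrite author's own statement) =====
-- stated objective: alternative
-- what changed: Replaces the counter-plus-set-with-removal scan by a sorting algorithm: concatenate the two deduplicated arrays, sort, and count adjacent equal pairs (a value is common iff it appears twice in the sorted concatenation).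
import Mathlib
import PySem

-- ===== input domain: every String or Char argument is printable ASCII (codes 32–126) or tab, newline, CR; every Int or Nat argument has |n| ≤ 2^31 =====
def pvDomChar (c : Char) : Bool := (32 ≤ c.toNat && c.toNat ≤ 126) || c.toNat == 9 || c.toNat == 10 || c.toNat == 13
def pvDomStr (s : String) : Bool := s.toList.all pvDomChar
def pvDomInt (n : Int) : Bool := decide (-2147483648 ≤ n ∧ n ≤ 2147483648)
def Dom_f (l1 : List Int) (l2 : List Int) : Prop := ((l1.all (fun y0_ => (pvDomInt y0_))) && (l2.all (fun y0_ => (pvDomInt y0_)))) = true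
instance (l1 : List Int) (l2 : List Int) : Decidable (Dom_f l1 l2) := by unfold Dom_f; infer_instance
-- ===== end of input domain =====

-- B replaces A's counter-plus-removal scan by sorting the concatenation of the two
-- deduplicated arrays and counting adjacent equal pairs (alternative algorithm, same result).

-- ===== PORT A =====
-- loop body: if l2[i] in s: c += 1; s.remove(l2[i])   (remove? is some here since the guard holds)
def fStep (cs : Int × PySem.Set Int) (x : Int) : Int × PySem.Set Int :=
  if PySem.Set.contains cs.2 x then (cs.1 + 1, (PySem.Set.remove? cs.2 x).getD cs.2) else cs

def f (l1 : List Int) (l2 : List Int) : Int :=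
  ((PySem.List.pyRange 0 (PySem.List.len l2) 1).foldl
    (fun cs i => fStep cs (PySem.List.pyGetD l2 i 0)) (0, PySem.Set.ofList l1)).1

-- ===== PORT B =====
-- m = sorted(list(set(l1)) + list(set(l2))); sum(1 for x, y in zip(m, m[1:]) if x == y)
def f_alt (l1 : List Int) (l2 : List Int) : Int :=
  let m := PySem.List.sorted (PySem.Set.ofList l1 ++ PySem.Set.ofList l2) (fun x => x) false
  (m.zip (PySem.List.slice m (some 1) none)).foldl
    (fun c p => if p.1 == p.2 then c + 1 else c) 0

-- ===== PRECONDITION & SPEC =====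
def Spec_f (l1 : List Int) (l2 : List Int) (out : Int) : Prop := out = f_alt l1 l2
instance (l1 : List Int) (l2 : List Int) (out : Int) : Decidable (Spec_f l1 l2 out) := by unfold Spec_f; infer_instance

-- ===== CLAIM (what is proved, stated in full; the proofs are below) =====
def Claim_equal_f : Prop := ∀ (l1 : List Int) (l2 : List Int), Dom_f l1 l2 → Spec_f l1 l2 (f l1 l2)

-- ===== LEMMAS AND PROOFS =====

-- counting split for the 'x in s' branch: one hit for x, the rest counted in s with x discarded
lemma filt_cons (x : Int) (xs : List Int) : ∀ (s : List Int), s.Nodup → x ∈ s →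
    (s.filter (fun y => y == x || xs.contains y)).length
      = 1 + ((s.filter (fun y => !(y == x))).filter (fun y => xs.contains y)).length := by
  intro s
  induction s with
  | nil => intro _ hx; simp at hx
  | cons a s' ih =>
    intro hs hx
    rcases List.nodup_cons.mp hs with ⟨ha, hs'⟩
    by_cases hax : a = x
    · subst hax
      have h1 : s'.filter (fun y => y == a || xs.contains y) = s'.filter (fun y => xs.contains y) :=
        List.filter_congr (fun y hy => by
          have : y ≠ a := fun e => ha (e ▸ hy); simp [this])
      have h2 : s'.filter (fun y => !(y == a)) = s' :=
        List.filter_eq_self.mpr (fun y hy => by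
          have : y ≠ a := fun e => ha (e ▸ hy); simp [this])
      rw [List.filter_cons, if_pos (by simp), List.filter_cons, if_neg (by simp), h1, h2,
        List.length_cons]
      omega
    · have hx' : x ∈ s' := by
        rcases List.mem_cons.mp hx with h | h
        · exact absurd h.symm hax
        · exact h
      have e1 : ((a :: s').filter (fun y => !(y == x))) = a :: s'.filter (fun y => !(y == x)) := by
        rw [List.filter_cons, if_pos (by simp [hax])]
      rw [e1]
      by_cases hmem : a ∈ xs
      · rw [List.filter_cons, if_pos (by simp [hmem]), List.filter_cons,
          if_pos (by simpa using hmem), List.length_cons, List.length_cons, ih hs' hx']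
        omega
      · rw [List.filter_cons, if_neg (by simp [hax, hmem]), List.filter_cons,
          if_neg (by simpa using hmem), ih hs' hx']

-- loop invariant: A's counter ends at c plus the number of elements of s that occur in l
lemma loopA (l : List Int) (c : Int) (s : List Int) (hs : s.Nodup) :
    (l.foldl fStep (c, s)).1 = c + ((s.filter (fun y => l.contains y)).length : Int) := by
  induction l generalizing c s with
  | nil => simp
  | cons x xs ih =>
    by_cases h : x ∈ s
    · have hstep : fStep (c, s) x = (c + 1, s.filter (fun y => !(y == x))) := by
        simp [fStep, PySem.Set.contains, PySem.Set.remove?, PySem.Set.discard, h]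
      have hpred : s.filter (fun y => (x :: xs).contains y)
          = s.filter (fun y => y == x || xs.contains y) :=
        List.filter_congr (fun y _ => by simp; tauto)
      rw [List.foldl_cons, hstep, ih _ _ (hs.filter _), hpred, filt_cons x xs s hs h]
      push_cast; ring
    · have hstep : fStep (c, s) x = (c, s) := by
        simp [fStep, PySem.Set.contains, h]
      have hpred : s.filter (fun y => (x :: xs).contains y)
          = s.filter (fun y => xs.contains y) :=
        List.filter_congr (fun y hy => by
          have : y ≠ x := fun e => h (e ▸ hy); simp [this])
      rw [List.foldl_cons, hstep, ih _ _ hs, hpred]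

-- adjacent equal pairs in a sorted list count the repeated positions: length minus #distinct
lemma adjCount_sorted (l : List Int) (hl : l.Pairwise (· ≤ ·)) :
    ((l.zip l.tail).countP (fun p => p.1 == p.2)) = l.length - l.toFinset.card := by
  induction l with
  | nil => simp
  | cons x xs ih =>
    rcases List.pairwise_cons.mp hl with ⟨hx, hxs⟩
    cases xs with
    | nil => simp
    | cons y t =>
      have ih' := ih hxs
      simp only [List.zip, List.tail_cons, List.length_cons] at ih'
      have hcard_le : (y :: t).toFinset.card ≤ t.length + 1 := by
        simpa using List.toFinset_card_le (y :: t)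
      by_cases hxy : x = y
      · subst hxy
        have hself : (x :: x :: t).toFinset = (x :: t).toFinset := by simp
        simp only [List.zip, List.tail_cons, List.zipWith_cons_cons, List.countP_cons,
          hself, List.length_cons]
        simp only [beq_self_eq_true, if_pos]
        omega
      · have hxnot : x ∉ (y :: t) := by
          intro hmem
          rcases List.mem_cons.mp hmem with h | h
          · exact hxy h
          · have h1 : x ≤ y := hx y (by simp)
            have h2 : y ≤ x := (List.pairwise_cons.mp hxs).1 x h
            exact hxy (le_antisymm h1 h2)
        have hcard : (x :: y :: t).toFinset.card = (y :: t).toFinset.card + 1 := by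
          rw [List.toFinset_cons, Finset.card_insert_of_notMem (by simpa using hxnot)]
        have hne : (x == y) = false := by simp [hxy]
        simp only [List.zip, List.tail_cons, List.zipWith_cons_cons, List.countP_cons,
          List.length_cons, hne, hcard, Bool.false_eq_true, if_false]
        omega

-- the filtered count on the A side is the cardinality of the Finset intersection
lemma filter_len_eq_inter_card (l1 l2 : List Int) :
    ((PySem.Set.ofList l1).filter (fun y => l2.contains y)).length
      = (l1.toFinset ∩ l2.toFinset).card := by
  have hnd : (PySem.Set.ofList l1).Nodup := PySem.Set.nodup_ofList l1
  have hndf := hnd.filter (fun y => l2.contains y)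
  rw [← List.toFinset_card_of_nodup hndf, List.toFinset_filter]
  congr 1
  ext a
  simp [PySem.Set.mem_ofList, Finset.mem_filter, List.mem_toFinset]

-- ===== VERDICT (by name: the statement is the Claim_ definition above) =====
theorem f_spec : Claim_equal_f := by
  intro l1 l2 _
  simp only [Spec_f, f, f_alt]
  rw [PySem.List.foldl_pyRange_zero_pyGetD l2 0 fStep (0, PySem.Set.ofList l1)]
  rw [loopA l2 0 (PySem.Set.ofList l1) (PySem.Set.nodup_ofList l1)]
  simp only [PySem.List.slice_from_one, PySem.List.foldl_if_add_one]
  set m := PySem.List.sorted (PySem.Set.ofList l1 ++ PySem.Set.ofList l2) (fun x => x) false with hm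
  have hperm : m.Perm (PySem.Set.ofList l1 ++ PySem.Set.ofList l2) := PySem.List.sorted_perm _ _ _
  have hpw : m.Pairwise (· ≤ ·) := PySem.List.sorted_pairwise _ _
  have hcount := adjCount_sorted m hpw
  have hlen : m.length = (PySem.Set.ofList l1).length + (PySem.Set.ofList l2).length := by
    rw [hperm.length_eq, List.length_append]
  have htf : m.toFinset = l1.toFinset ∪ l2.toFinset := by
    rw [List.toFinset_eq_of_perm _ _ hperm, List.toFinset_append]
    congr 1 <;> · ext a; simp [PySem.Set.mem_ofList, List.mem_toFinset]
  have hUI := Finset.card_union_add_card_inter l1.toFinset l2.toFinset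
  have h1 : (PySem.Set.ofList l1).length = l1.toFinset.card := by
    rw [← List.toFinset_card_of_nodup (PySem.Set.nodup_ofList l1)]
    congr 1; ext a; simp [PySem.Set.mem_ofList]
  have h2 : (PySem.Set.ofList l2).length = l2.toFinset.card := by
    rw [← List.toFinset_card_of_nodup (PySem.Set.nodup_ofList l2)]
    congr 1; ext a; simp [PySem.Set.mem_ofList]
  have hinter_le : (l1.toFinset ∩ l2.toFinset).card ≤ l1.toFinset.card :=
    Finset.card_le_card Finset.inter_subset_left
  rw [filter_len_eq_inter_card, hcount, hlen, htf, h1, h2]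
  omega
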